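-- pv_equiv track=rewrite | github.com/turesheim/SIDScore | tools/import_mutopia_beetson.py | decompose_duration
-- ===== SOURCE A (Python) =====
-- DUR_PARTS: list[tuple[int, int, bool]] = [
--     (288, 1, True),
--     (192, 1, False),
--     (144, 2, True),
--     (96, 2, False),
--     (72, 4, True),
--     (48, 4, False),
--     (36, 8, True),
--     (24, 8, False),
--     (18, 16, True),
--     (12, 16, False),
--     (9, 32, True),
--     (6, 32, False),
--     (3, 64, False),
-- ]
--
-- def decompose_duration(ticks: int) -> list[tuple[int, int, bool]]:
--     remaining = max(3, ticks)
--     parts: list[tuple[int, int, bool]] = []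
--     while remaining > 0:
--         choice = None
--         for p in DUR_PARTS:
--             if p[0] <= remaining:
--                 choice = p
--                 break
--         if choice is None:
--             choice = DUR_PARTS[-1]
--         parts.append(choice)
--         remaining -= choice[0]
--     return parts
-- ===== SOURCE B (Python) =====
-- DUR_PARTS: list[tuple[int, int, bool]] = [
--     (288, 1, True),
--     (192, 1, False),
--     (144, 2, True),
--     (96, 2, False),
--     (72, 4, True),
--     (48, 4, False),
--     (36, 8, True),
--     (24, 8, False),
--     (18, 16, True),
--     (12, 16, False),
--     (9, 32, True),
--     (6, 32, False),
--     (3, 64, False),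
-- ]
--
-- def decompose_duration(ticks: int) -> list[tuple[int, int, bool]]:
--     remaining = max(3, ticks)
--     parts: list[tuple[int, int, bool]] = []
--     for p in DUR_PARTS:
--         cnt, remaining = divmod(remaining, p[0])
--         parts.extend([p] * cnt)
--     if remaining > 0:
--         parts.append(DUR_PARTS[-1])
--     return parts
-- ===== Notes on version B (the rewrite author's own statement) =====
-- stated objective: alternative
-- what changed: Replaces the per-tick greedy while loop (which rescans DUR_PARTS to subtract one part at a time) with a single divmod pass over DUR_PARTS, emitting each part's full repetition count at once.
import Mathlib
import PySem

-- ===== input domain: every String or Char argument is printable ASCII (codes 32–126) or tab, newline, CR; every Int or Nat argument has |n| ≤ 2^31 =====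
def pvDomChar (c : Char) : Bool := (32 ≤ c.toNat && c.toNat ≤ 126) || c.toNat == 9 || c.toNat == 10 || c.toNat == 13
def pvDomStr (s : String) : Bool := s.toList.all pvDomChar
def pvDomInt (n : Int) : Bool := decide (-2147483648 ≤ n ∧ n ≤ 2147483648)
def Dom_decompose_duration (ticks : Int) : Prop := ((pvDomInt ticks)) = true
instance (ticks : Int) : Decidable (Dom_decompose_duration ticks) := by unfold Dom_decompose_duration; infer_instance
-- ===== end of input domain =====

-- B replaces A's one-part-per-iteration greedy loop by a single divmod pass over DUR_PARTS
-- (objective: alternative — one arithmetic step per part instead of one subtraction per emitted part).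

-- ===== PORT A =====
def DUR_PARTS : List (Int × Int × Bool) :=
  [(288, 1, true), (192, 1, false), (144, 2, true), (96, 2, false),
   (72, 4, true), (48, 4, false), (36, 8, true), (24, 8, false),
   (18, 16, true), (12, 16, false), (9, 32, true), (6, 32, false), (3, 64, false)]

-- termination helper for the while loop: the chosen part is always ≥ 3
theorem pv_choice_ge (r : Int) :
    3 ≤ ((DUR_PARTS.find? (fun p => decide (p.1 ≤ r))).getD
          (PySem.List.pyGetD DUR_PARTS (-1) (0, 0, false))).1 := by
  cases h : DUR_PARTS.find? (fun p => decide (p.1 ≤ r)) with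
  | none => simp only [Option.getD_none]; decide
  | some p =>
      have hmem := List.mem_of_find?_eq_some h
      have hall : ∀ q ∈ DUR_PARTS, (3 : Int) ≤ q.1 := by decide
      simpa using hall p hmem

-- the while loop of A: scan DUR_PARTS for the first part ≤ remaining (break), fall back to DUR_PARTS[-1]
def decompose_duration_loop (remaining : Int) (parts : List (Int × Int × Bool)) :
    List (Int × Int × Bool) :=
  if 0 < remaining then
    let choice := (DUR_PARTS.find? (fun p => decide (p.1 ≤ remaining))).getD
      (PySem.List.pyGetD DUR_PARTS (-1) (0, 0, false))
    decompose_duration_loop (remaining - choice.1) (parts ++ [choice])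
  else parts
termination_by remaining.toNat
decreasing_by
  have h3 := pv_choice_ge remaining
  omega

def decompose_duration (ticks : Int) : List (Int × Int × Bool) :=
  decompose_duration_loop (max 3 ticks) []

-- ===== PORT B =====
-- one divmod step of B's single pass
def pvBStep (st : List (Int × Int × Bool) × Int) (p : Int × Int × Bool) :
    List (Int × Int × Bool) × Int :=
  (st.1 ++ List.replicate (PySem.Int.floordiv st.2 p.1).toNat p, PySem.Int.mod st.2 p.1)

def decompose_duration_alt (ticks : Int) : List (Int × Int × Bool) :=
  let st := DUR_PARTS.foldl pvBStep ([], max 3 ticks)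
  if 0 < st.2 then st.1 ++ [PySem.List.pyGetD DUR_PARTS (-1) (0, 0, false)] else st.1

-- ===== PRECONDITION & SPEC =====
def Spec_decompose_duration (ticks : Int) (out : List (Int × Int × Bool)) : Prop := out = decompose_duration_alt ticks
instance (ticks : Int) (out : List (Int × Int × Bool)) : Decidable (Spec_decompose_duration ticks out) := by unfold Spec_decompose_duration; infer_instance

-- ===== CLAIM (what is proved, stated in full; the proofs are below) =====
def Claim_equal_decompose_duration : Prop := ∀ (ticks : Int), Dom_decompose_duration ticks → Spec_decompose_duration ticks (decompose_duration ticks)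

-- ===== LEMMAS AND PROOFS =====

-- proof-side generalisation of A's loop over an arbitrary part list
-- (the 'max 1' only guards termination; for every list we use, the choice is ≥ 3)
def pvAloop (L : List (Int × Int × Bool)) (r : Int) : List (Int × Int × Bool) :=
  if 0 < r then
    let c := (L.find? (fun p => decide (p.1 ≤ r))).getD (3, 64, false)
    c :: pvAloop L (r - max 1 c.1)
  else []
termination_by r.toNat
decreasing_by
  have h1 : (1 : Int) ≤ max 1 ((L.find? (fun p => decide (p.1 ≤ r))).getD (3, 64, false)).1 :=
    le_max_left _ _
  omega

theorem pv_loopA_eq : ∀ (n : Nat) (r : Int), r.toNat ≤ n → ∀ acc,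
    decompose_duration_loop r acc = acc ++ pvAloop DUR_PARTS r := by
  intro n
  induction n with
  | zero =>
      intro r hr acc
      rw [decompose_duration_loop, pvAloop]
      have : ¬ 0 < r := by omega
      simp [this]
  | succ n ih =>
      intro r hr acc
      by_cases h : 0 < r
      · rw [decompose_duration_loop, pvAloop]
        simp only [if_pos h]
        have hfb : PySem.List.pyGetD DUR_PARTS (-1) ((0 : Int), (0 : Int), false)
            = ((3 : Int), (64 : Int), false) := by decide
        rw [hfb]
        set c := (DUR_PARTS.find? (fun p => decide (p.1 ≤ r))).getD ((3 : Int), (64 : Int), false) with hc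
        have h3 : 3 ≤ c.1 := by
          have := pv_choice_ge r
          rw [hfb] at this
          exact this
        have hmax : max 1 c.1 = c.1 := by omega
        rw [hmax, ih (r - c.1) (by omega) (acc ++ [c])]
        simp
      · rw [decompose_duration_loop, pvAloop]
        simp [h]

theorem pv_skip (p : Int × Int × Bool) (L : List (Int × Int × Bool)) :
    ∀ (n : Nat) (r : Int), r.toNat ≤ n → r < p.1 → pvAloop (p :: L) r = pvAloop L r := by
  intro n
  induction n with
  | zero =>
      intro r hr hlt
      rw [pvAloop, pvAloop]
      have : ¬ 0 < r := by omega
      simp [this]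
  | succ n ih =>
      intro r hr hlt
      by_cases h : 0 < r
      · rw [pvAloop, pvAloop]
        simp only [if_pos h]
        have hfind : (p :: L).find? (fun q => decide (q.1 ≤ r)) = L.find? (fun q => decide (q.1 ≤ r)) := by
          simp [List.find?, show ¬ (p.1 ≤ r) by omega]
        rw [hfind]
        set c := (L.find? (fun q => decide (q.1 ≤ r))).getD ((3 : Int), (64 : Int), false) with hc
        have h1 : (1 : Int) ≤ max 1 c.1 := le_max_left _ _
        rw [ih (r - max 1 c.1) (by omega) (by omega)]
      · rw [pvAloop, pvAloop]
        simp [h]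

theorem pv_divmod (p : Int × Int × Bool) (L : List (Int × Int × Bool)) (hp : 0 < p.1) :
    ∀ (n : Nat) (r : Int), r.toNat ≤ n → 0 ≤ r →
    pvAloop (p :: L) r = List.replicate ((r / p.1).toNat) p ++ pvAloop (p :: L) (r % p.1) := by
  intro n
  induction n with
  | zero =>
      intro r hr h0
      have : r = 0 := by omega
      subst this
      simp
  | succ n ih =>
      intro r hr h0
      by_cases hle : p.1 ≤ r
      · have hq1 : 1 ≤ r / p.1 := by
          rw [Int.le_ediv_iff_mul_le hp]; omega
        have hsub : (r - p.1) / p.1 = r / p.1 - 1 := by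
          have := Int.add_mul_ediv_right r (-1) (ne_of_gt hp)
          simpa [sub_eq_add_neg, neg_mul] using this
        have hmod : (r - p.1) % p.1 = r % p.1 := by
          conv_lhs => rw [show r - p.1 = r + p.1 * (-1) by ring]
          rw [Int.add_mul_emod_self_left]
        rw [pvAloop]
        have hpos : 0 < r := by omega
        simp only [if_pos hpos]
        have hfind : (p :: L).find? (fun q => decide (q.1 ≤ r)) = some p := by
          simp [List.find?, hle]
        rw [hfind]
        simp only [Option.getD_some]
        have hmax : max 1 p.1 = p.1 := by omega
        rw [hmax, ih (r - p.1) (by omega) (by omega), hsub, hmod]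
        have hqn : (r / p.1).toNat = ((r / p.1 - 1).toNat) + 1 := by omega
        rw [hqn, List.replicate_succ, List.cons_append]
      · have hq : r / p.1 = 0 := Int.ediv_eq_zero_of_lt h0 (by omega)
        have hm : r % p.1 = r := Int.emod_eq_of_lt h0 (by omega)
        rw [hq, hm]
        simp

theorem pv_fold_acc (L : List (Int × Int × Bool)) :
    ∀ (acc : List (Int × Int × Bool)) (r : Int),
    L.foldl pvBStep (acc, r)
      = (acc ++ (L.foldl pvBStep ([], r)).1, (L.foldl pvBStep ([], r)).2) := by
  induction L with
  | nil => intro acc r; simp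
  | cons p L ih =>
      intro acc r
      simp only [List.foldl_cons, pvBStep, List.nil_append]
      rw [ih (acc ++ List.replicate (PySem.Int.floordiv r p.1).toNat p) (PySem.Int.mod r p.1),
          ih (List.replicate (PySem.Int.floordiv r p.1).toNat p) (PySem.Int.mod r p.1)]
      simp

theorem pv_core : ∀ (L : List (Int × Int × Bool)) (r : Int),
    (∀ p ∈ L, 0 < p.1) → (∀ h : L ≠ [], (L.getLast h).1 ≤ 3) → 0 ≤ r → (L = [] → r < 3) →
    pvAloop L r = (L.foldl pvBStep ([], r)).1 ++
      (if 0 < (L.foldl pvBStep ([], r)).2 then [((3 : Int), (64 : Int), false)] else []) := by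
  intro L
  induction L with
  | nil =>
      intro r _ _ h0 hsm
      have hr3 : r < 3 := hsm rfl
      by_cases h : 0 < r
      · rw [pvAloop]
        simp only [if_pos h, List.find?_nil, Option.getD_none]
        rw [pvAloop]
        have hm : max (1 : Int) ((3 : Int), (64 : Int), false).1 = 3 := by norm_num
        rw [hm, if_neg (show ¬ 0 < r - 3 by omega)]
        simp [h]
      · rw [pvAloop]
        simp [h]
  | cons p L ih =>
      intro r hpos hlast h0 _
      have hp : 0 < p.1 := hpos p (List.mem_cons_self ..)
      have hfd : PySem.Int.floordiv r p.1 = r / p.1 := PySem.Int.floordiv_eq_ediv_of_pos hp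
      have hmd : PySem.Int.mod r p.1 = r % p.1 := PySem.Int.mod_eq_emod_of_pos hp
      have hm0 : 0 ≤ r % p.1 := Int.emod_nonneg r (ne_of_gt hp)
      have hmlt : r % p.1 < p.1 := Int.emod_lt_of_pos r hp
      have lhs : pvAloop (p :: L) r
          = List.replicate ((r / p.1).toNat) p ++ pvAloop L (r % p.1) := by
        rw [pv_divmod p L hp r.toNat r (le_refl _) h0,
            pv_skip p L (r % p.1).toNat (r % p.1) (le_refl _) hmlt]
      have hlast' : ∀ h : L ≠ [], (L.getLast h).1 ≤ 3 := by
        intro h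
        have := hlast (by simp)
        rwa [List.getLast_cons h] at this
      have hsm' : L = [] → r % p.1 < 3 := by
        intro h
        subst h
        have := hlast (by simp)
        simp at this
        omega
      have rhs : (p :: L).foldl pvBStep ([], r)
          = (List.replicate ((r / p.1).toNat) p ++ (L.foldl pvBStep ([], r % p.1)).1,
             (L.foldl pvBStep ([], r % p.1)).2) := by
        simp only [List.foldl_cons, pvBStep, hfd, hmd, List.nil_append]
        exact pv_fold_acc L _ _
      rw [lhs, rhs, ih (r % p.1) (fun q hq => hpos q (List.mem_cons_of_mem p hq)) hlast' hm0 hsm']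
      simp

-- ===== VERDICT (by name: the statement is the Claim_ definition above) =====
theorem decompose_duration_spec : Claim_equal_decompose_duration := by
  intro ticks _
  unfold Spec_decompose_duration decompose_duration decompose_duration_alt
  rw [pv_loopA_eq (max 3 ticks).toNat (max 3 ticks) (le_refl _) []]
  rw [pv_core DUR_PARTS (max 3 ticks) (by decide) (by decide)
      (by omega) (fun h => absurd h (by decide))]
  have hfb : PySem.List.pyGetD DUR_PARTS (-1) ((0 : Int), (0 : Int), false)
      = ((3 : Int), (64 : Int), false) := by decide
  rw [hfb]
  split_ifs <;> simp_all
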